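-- pv_equiv track=rewrite | github.com/G-Just/Python-SHA_256 | SHA.py | sigma_up_1
-- ===== SOURCE A (Python) =====
-- def rotate_r(n, word):
--     for i in range(0, n):
--         word = word[-1] + word
--         word = word[:-1:]
--     return word
--
-- def sigma_up_1(word):
--     ans = ''
--     l1 = rotate_r(6, word)
--     l2 = rotate_r(11, word)
--     l3 = rotate_r(25, word)
--     for i in range(0, len(word)):
--         if int(l1[i]) + int(l2[i]) + int(l3[i]) == 1 or int(l1[i]) + int(l2[i]) + int(l3[i]) == 3:
--             ans += '1'
--         else:
--             ans += '0'
--     return ans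
-- ===== SOURCE B (Python) =====
-- def sigma_up_1(word):
--     L = len(word)
--     out = []
--     for i in range(L):
--         s = int(word[(i - 6) % L]) + int(word[(i - 11) % L]) + int(word[(i - 25) % L])
--         out.append('1' if s == 1 or s == 3 else '0')
--     return ''.join(out)
-- ===== Notes on version B (the rewrite author's own statement) =====
-- stated objective: faster
-- what changed: Instead of materializing three right-rotated copies of the string via repeated last-char-prepend-and-trim (6+11+25 quadratic-cost string rebuilds), B computes each output bit in one pass directly from the original word using modular index arithmetic (i-6)%L, (i-11)%L, (i-25)%L, collecting into a list joined once.
import Mathlib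
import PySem

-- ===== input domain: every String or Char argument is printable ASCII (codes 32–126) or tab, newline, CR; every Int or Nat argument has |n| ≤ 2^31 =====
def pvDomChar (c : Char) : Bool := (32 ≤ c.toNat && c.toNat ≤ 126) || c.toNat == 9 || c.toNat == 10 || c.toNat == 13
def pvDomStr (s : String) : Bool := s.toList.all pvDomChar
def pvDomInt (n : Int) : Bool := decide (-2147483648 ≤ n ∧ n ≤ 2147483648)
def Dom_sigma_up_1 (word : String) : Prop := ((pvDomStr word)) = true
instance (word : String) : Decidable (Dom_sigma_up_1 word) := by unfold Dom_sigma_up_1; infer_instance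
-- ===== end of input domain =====

-- B computes each output bit directly from the original word with modular indexing, in one
-- pass, instead of building three right-rotated copies of the string (objective: faster).

-- ===== PORT A =====
-- int(l[i]): the .getD 0 default is reached only on the inputs Pre_ excludes, where Python A raises
def pvIntAtA (l : List Char) (i : Int) : Int :=
  ((PySem.List.pyGet? l i).bind (fun c => PySem.Int.ofChars? [c])).getD 0

-- rotate_r: n times, word = word[-1] + word; word = word[:-1:]  (on "" Python raises IndexError:
-- the .getD w default stands in; Pre_ excludes the empty string)
def rotate_r (n : Int) (word : List Char) : List Char :=
  (PySem.List.pyRange 0 n).foldl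
    (fun w _ =>
      let w1 := ((PySem.List.pyGet? w (-1)).map (fun c => [c] ++ w)).getD w
      PySem.List.slice w1 none (some (-1)))
    word

def sigma_up_1 (word : String) : String :=
  let l1 := rotate_r 6 word.toList
  let l2 := rotate_r 11 word.toList
  let l3 := rotate_r 25 word.toList
  String.mk ((PySem.List.pyRange 0 (word.toList.length : Int)).foldl
    (fun ans i =>
      if pvIntAtA l1 i + pvIntAtA l2 i + pvIntAtA l3 i = 1 ∨
         pvIntAtA l1 i + pvIntAtA l2 i + pvIntAtA l3 i = 3 then
        ans ++ ['1']
      else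
        ans ++ ['0'])
    [])

-- ===== PORT B =====
def sigma_up_1_alt (word : String) : String :=
  let cs := word.toList
  let L : Int := cs.length
  String.mk ((PySem.List.pyRange 0 L).foldl
    (fun out i =>
      -- int(word[j]) at the three modular indices (the .getD 0 default is raise-free under Pre_)
      let dig := fun (j : Int) => ((PySem.List.pyGet? cs j).bind (fun c => PySem.Int.ofChars? [c])).getD 0
      let s := dig (PySem.Int.mod (i - 6) L) + dig (PySem.Int.mod (i - 11) L) +
               dig (PySem.Int.mod (i - 25) L)
      out ++ [if s = 1 ∨ s = 3 then '1' else '0'])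
    [])

-- ===== PRECONDITION & SPEC =====
-- Pre_ excludes exactly the inputs where Python A raises: the empty string (IndexError from
-- ''[-1] in rotate_r) and strings containing a non-digit character (ValueError from int(c)).
def Pre_sigma_up_1 (word : String) : Prop :=
  word.toList ≠ [] ∧ word.toList.all (fun c => c.isDigit) = true
instance (word : String) : Decidable (Pre_sigma_up_1 word) := by unfold Pre_sigma_up_1; infer_instance
def pvWitness_sigma_up_1 : String := "0110101"

def Spec_sigma_up_1 (word : String) (out : String) : Prop := out = sigma_up_1_alt word
instance (word : String) (out : String) : Decidable (Spec_sigma_up_1 word out) := by unfold Spec_sigma_up_1; infer_instance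

-- ===== CLAIM (what is proved, stated in full; the proofs are below) =====
def Claim_equal_sigma_up_1 : Prop := ∀ (word : String), Dom_sigma_up_1 word → Pre_sigma_up_1 word → Spec_sigma_up_1 word (sigma_up_1 word)

-- ===== LEMMAS AND PROOFS =====

-- one body of rotate_r's loop on a nonempty string is a right rotation by one position
theorem pv_step_eq (w : List Char) (h : w ≠ []) :
    PySem.List.slice (((PySem.List.pyGet? w (-1)).map (fun c => [c] ++ w)).getD w) none (some (-1))
    = w.rotate (w.length - 1) := by
  have h1 : PySem.List.pyGet? w (-1) = some (w.getLast h) := by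
    simp [pysem]; exact List.getLast?_eq_some_getLast h
  rw [h1]
  simp only [Option.map_some, Option.getD_some, PySem.List.slice_to_neg_one]
  rw [List.rotate_eq_drop_append_take (by omega : w.length - 1 ≤ w.length),
      List.drop_length_sub_one h, ← List.dropLast_eq_take]
  simp [List.dropLast_cons_of_ne_nil h]

-- A's rotate_r n is a left rotation by (length-1)*n
theorem pv_rotate_r_eq (n : Nat) (w : List Char) (h : w ≠ []) :
    rotate_r (n : Int) w = w.rotate ((w.length - 1) * n) := by
  induction n with
  | zero => simp [rotate_r, PySem.List.pyRange]
  | succ n ih =>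
    have hr : PySem.List.pyRange 0 ((n : Int) + 1) = PySem.List.pyRange 0 (n : Int) ++ [(n : Int)] :=
      PySem.List.pyRange_one_succ_right (by positivity)
    have hstep : rotate_r ((n + 1 : Nat) : Int) w
        = PySem.List.slice ((((PySem.List.pyGet? (rotate_r (n : Int) w) (-1)).map
            (fun c => [c] ++ rotate_r (n : Int) w)).getD (rotate_r (n : Int) w))) none (some (-1)) := by
      simp only [rotate_r, Nat.cast_add, Nat.cast_one, hr, List.foldl_append, List.foldl_cons,
        List.foldl_nil]
    rw [hstep, pv_step_eq _ (by rw [ih]; simp [List.rotate_eq_nil_iff]; exact h), ih]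
    rw [List.rotate_rotate, List.length_rotate]
    congr 1

-- the rotated string read at i is the original read at (i - k) mod L (Python's %)
theorem pv_index_eq (cs : List Char) (h : cs ≠ []) (k i : Nat) (hi : i < cs.length) :
    PySem.List.pyGet? (rotate_r (k : Int) cs) (i : Int)
      = PySem.List.pyGet? cs (PySem.Int.mod ((i : Int) - (k : Int)) (cs.length : Int)) := by
  have hL : 0 < cs.length := List.length_pos_iff.mpr h
  have hL1 : 1 ≤ cs.length := hL
  rw [pv_rotate_r_eq k cs h, PySem.Int.mod_eq_emod_of_pos (by exact_mod_cast hL)]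
  have hc : ((i + (cs.length - 1) * k : Nat) : Int) = (i : Int) + ((cs.length : Int) - 1) * k := by
    push_cast [Nat.cast_sub hL1]; ring
  have hmod : ((i : Int) - (k : Int)) % (cs.length : Int)
      = ((i + (cs.length - 1) * k) % cs.length : Nat) := by
    have h2 : ((i : Int) - (k : Int))
        = ((i + (cs.length - 1) * k : Nat) : Int) - (k : Int) * (cs.length : Int) := by
      rw [hc]; ring
    rw [h2, Int.sub_mul_emod_self_right, Int.ofNat_mod_ofNat]
  rw [hmod]
  rw [PySem.List.pyGet?_natCast, PySem.List.pyGet?_natCast]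
  have hi' : i < (cs.rotate ((cs.length - 1) * k)).length := by simpa using hi
  rw [List.getElem?_eq_getElem hi', List.getElem?_eq_getElem (Nat.mod_lt _ hL)]
  simp [List.getElem_rotate]

theorem pv_main (word : String) (h : word.toList ≠ []) :
    sigma_up_1 word = sigma_up_1_alt word := by
  unfold sigma_up_1 sigma_up_1_alt
  simp only []
  congr 1
  have hsplit : ∀ (P : Int → Prop) [DecidablePred P],
      (fun (ans : List Char) (i : Int) => if P i then ans ++ ['1'] else ans ++ ['0'])
      = (fun ans i => ans ++ [if P i then '1' else '0']) := by
    intro P _; funext ans i; split_ifs <;> rfl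
  rw [hsplit, PySem.List.foldl_append_singleton_eq_map, PySem.List.foldl_append_singleton_eq_map]
  simp only [List.nil_append]
  apply List.map_congr_left
  intro i hmem
  rw [PySem.List.mem_pyRange_one] at hmem
  obtain ⟨h0, hlt⟩ := hmem
  have hi : i = ((i.toNat : Nat) : Int) := (Int.toNat_of_nonneg h0).symm
  have hilen : i.toNat < word.toList.length := by omega
  have key : ∀ (k : Nat), pvIntAtA (rotate_r (k : Int) word.toList) i
      = ((PySem.List.pyGet? word.toList (PySem.Int.mod (i - (k : Int)) (word.toList.length : Int))).bind
          (fun c => PySem.Int.ofChars? [c])).getD 0 := by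
    intro k
    unfold pvIntAtA
    rw [hi, pv_index_eq word.toList h k i.toNat hilen]
  have e6 := key 6; have e11 := key 11; have e25 := key 25
  norm_num [String.length_toList] at e6 e11 e25 ⊢
  rw [e6, e11, e25]

-- ===== VERDICT (by name: the statement is the Claim_ definition above) =====
theorem sigma_up_1_spec : Claim_equal_sigma_up_1 := by
  intro word _ hpre
  unfold Spec_sigma_up_1
  exact pv_main word hpre.1
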